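-- pv_equiv track=rewrite | github.com/MarionLeHerisson/pyDES | des.py | convert64to56
-- ===== SOURCE A (Python) =====
-- def convert64to56(key):
--     newkey = ""
--     i = 0
--     for bit in key:
--         if (i + 1) % 8 != 0:
--             newkey += bit
--         i += 1
--     return newkey
-- ===== SOURCE B (Python) =====
-- def convert64to56(key):
--     parts = []
--     i = 0
--     n = len(key)
--     while i < n:
--         parts.append(key[i:i+7])
--         i += 8
--     return "".join(parts)
-- ===== Notes on version B (the rewrite author's own statement) =====
-- stated objective: faster
-- what changed: Replaces the per-character loop with a modulo position counter and string += by a stride-8 loop collecting key[i:i+7] slices, joined once at the end.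
import Mathlib
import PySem

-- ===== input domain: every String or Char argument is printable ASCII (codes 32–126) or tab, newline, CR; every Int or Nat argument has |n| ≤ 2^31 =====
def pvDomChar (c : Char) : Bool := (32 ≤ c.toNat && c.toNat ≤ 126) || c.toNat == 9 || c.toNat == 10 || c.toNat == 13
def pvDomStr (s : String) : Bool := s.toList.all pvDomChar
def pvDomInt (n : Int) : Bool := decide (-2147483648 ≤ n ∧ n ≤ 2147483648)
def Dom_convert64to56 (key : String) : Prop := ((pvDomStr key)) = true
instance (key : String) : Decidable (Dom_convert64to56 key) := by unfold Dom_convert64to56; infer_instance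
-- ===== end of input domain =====

-- B replaces A's per-character loop (modulo counter, char-by-char append) by a stride-8 loop
-- collecting 7-char slices, joined at the end (objective: alternative decomposition).

-- ===== PORT A =====
-- step of A's 'for bit in key' loop; state = (newkey, i)
def convAStep (st : List Char × Int) (bit : Char) : List Char × Int :=
  (if PySem.Int.mod (st.2 + 1) 8 ≠ 0 then st.1 ++ [bit] else st.1, st.2 + 1)

def convert64to56 (key : String) : String :=
  String.mk (key.toList.foldl convAStep ([], 0)).1

-- ===== PORT B =====
-- B's 'while i < n: parts.append(key[i:i+7]); i += 8'
def convBLoop (cs : List Char) (i : Int) : List (List Char) :=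
  if i < (cs.length : Int) then
    PySem.List.slice cs (some i) (some (i + 7)) :: convBLoop cs (i + 8)
  else []
termination_by ((cs.length : Int) - i).toNat
decreasing_by omega

def convert64to56_alt (key : String) : String :=
  String.mk (convBLoop key.toList 0).flatten

-- ===== PRECONDITION & SPEC =====
def Spec_convert64to56 (key : String) (out : String) : Prop := out = convert64to56_alt key
instance (key : String) (out : String) : Decidable (Spec_convert64to56 key out) := by unfold Spec_convert64to56; infer_instance

-- ===== CLAIM (what is proved, stated in full; the proofs are below) =====
def Claim_equal_convert64to56 : Prop := ∀ (key : String), Dom_convert64to56 key → Spec_convert64to56 key (convert64to56 key)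

-- ===== LEMMAS AND PROOFS =====

-- reference function: keep 7 chars, drop the 8th, block by block
def pvChunks : List Char → List Char
  | [] => []
  | c :: cs => (c :: cs.take 6) ++ pvChunks (cs.drop 7)
termination_by cs => cs.length
decreasing_by simp

lemma pvChunks_nil : pvChunks [] = [] := by rw [pvChunks]

lemma pvChunks_take_drop (t : List Char) :
    pvChunks t = t.take 7 ++ pvChunks (t.drop 8) := by
  cases t with
  | nil => simp [pvChunks_nil]
  | cons c cs => rw [pvChunks]; simp [List.take_succ_cons, List.drop_succ_cons]

-- what A's loop keeps, starting at counter i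
def pvKeep (i : Int) : List Char → List Char
  | [] => []
  | c :: cs => (if PySem.Int.mod (i + 1) 8 ≠ 0 then [c] else []) ++ pvKeep (i + 1) cs

lemma foldl_convAStep (cs : List Char) : ∀ (acc : List Char) (i : Int),
    (cs.foldl convAStep (acc, i)).1 = acc ++ pvKeep i cs := by
  induction cs with
  | nil => intro acc i; simp [pvKeep]
  | cons c cs ih =>
      intro acc i
      simp only [List.foldl_cons, convAStep, pvKeep]
      split <;> simp [ih]

lemma pvKeep_mod (cs : List Char) : ∀ (i j : Int), i % 8 = j % 8 →
    pvKeep i cs = pvKeep j cs := by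
  induction cs with
  | nil => intro i j _; rfl
  | cons c cs ih =>
      intro i j h
      simp only [pvKeep, PySem.Int.mod_eq_emod_of_pos (show (0:Int) < 8 by norm_num)]
      have h1 : (i + 1) % 8 = (j + 1) % 8 := by omega
      rw [h1, ih (i + 1) (j + 1) h1]

lemma pvKeep_eq_chunks (cs : List Char) : ∀ (j : Nat), j < 8 →
    pvKeep (j : Int) cs = cs.take (7 - j) ++ pvChunks (cs.drop (8 - j)) := by
  induction cs with
  | nil => intro j _; simp [pvKeep, pvChunks_nil]
  | cons c cs ih =>
      intro j hj
      simp only [pvKeep]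
      rw [PySem.Int.mod_eq_emod_of_pos (show (0:Int) < 8 by norm_num)]
      by_cases h7 : j < 7
      · have hne : ((j : Int) + 1) % 8 ≠ 0 := by omega
        have hcast : (j : Int) + 1 = ((j + 1 : Nat) : Int) := by push_cast; ring
        rw [if_pos hne, hcast, ih (j + 1) (by omega)]
        have e1 : (c :: cs).take (7 - j) = c :: cs.take (7 - (j + 1)) := by
          have : 7 - j = (7 - (j + 1)) + 1 := by omega
          rw [this]; rfl
        have e2 : (c :: cs).drop (8 - j) = cs.drop (8 - (j + 1)) := by
          have : 8 - j = (8 - (j + 1)) + 1 := by omega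
          rw [this]; rfl
        simp [e1, e2]
      · have hj7 : j = 7 := by omega
        subst hj7
        have hz : ((7 : Nat) : Int) + 1 = 8 := by norm_num
        rw [hz]
        simp only [if_neg (by norm_num : ¬ ((8 : Int) % 8 ≠ 0))]
        rw [pvKeep_mod cs 8 ((0 : Nat) : Int) (by norm_num), ih 0 (by norm_num)]
        simp [← pvChunks_take_drop]

lemma convBLoop_flatten (k : Nat) : ∀ (cs : List Char) (i : Int), 0 ≤ i →
    cs.length - i.toNat ≤ k → (convBLoop cs i).flatten = pvChunks (cs.drop i.toNat) := by
  induction k with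
  | zero =>
      intro cs i hi hk
      rw [convBLoop]
      rw [if_neg (by omega)]
      have : cs.drop i.toNat = [] := by
        apply List.drop_eq_nil_of_le; omega
      rw [this]; simp [pvChunks_nil]
  | succ k ih =>
      intro cs i hi hk
      rw [convBLoop]
      by_cases h : i < (cs.length : Int)
      · rw [if_pos h]
        have hslice : PySem.List.slice cs (some i) (some (i + 7))
            = (cs.drop i.toNat).take 7 := by
          rw [PySem.List.slice_toNat cs hi (by omega)]
          congr 1
          omega
        have hdrop : cs.drop (i + 8).toNat = (cs.drop i.toNat).drop 8 := by
          rw [List.drop_drop]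
          congr 1
          omega
        rw [List.flatten_cons, ih cs (i + 8) (by omega) (by omega), hslice, hdrop,
          ← pvChunks_take_drop]
      · rw [if_neg h]
        have : cs.drop i.toNat = [] := by
          apply List.drop_eq_nil_of_le; omega
        rw [this]; simp [pvChunks_nil]

-- ===== VERDICT (by name: the statement is the Claim_ definition above) =====
theorem convert64to56_spec : Claim_equal_convert64to56 := by
  intro key _
  unfold Spec_convert64to56 convert64to56 convert64to56_alt
  rw [foldl_convAStep, List.nil_append,
    convBLoop_flatten (key.toList.length) key.toList 0 (by norm_num) (by simp)]
  rw [show (0 : Int) = ((0 : Nat) : Int) from rfl, pvKeep_eq_chunks key.toList 0 (by norm_num)]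
  simp [← pvChunks_take_drop]
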